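/- GENERATED by farm/mkstatement.py from design/units.tsv (unit `compute_bitreverse`) and the Specs of Vorbis/Spec/*.lean — do not edit.
   THE STATEMENT of the proof unit `compute_bitreverse`: the function `compute_bitreverse` (36 instructions) satisfies its contract,
   given the contracts of its callees. What the names mean: Vorbis/Spec/Basic.lean. The theorem to prove:
   `theorem compute_bitreverse_ok : Vorbis.Spec.compute_bitreverse.Statement`. -/
import Vorbis.Spec.Leaves2
import Vorbis.Spec.Mdct
namespace Vorbis.Spec.compute_bitreverse
open X86 X86.User Asan

/-- The statement of unit `compute_bitreverse`. -/
def Statement : Prop :=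
  ∀ (Lay : Layout) (_hLay : Lay.hi = 0x1000000) (μ : Microarch) (_hμ : UserX.MicroOK μ) (u₀ : State)
    (_hcode : HasCodeNat Lay u₀ Vorbis.L.compute_bitreverse.entry Vorbis.Code.code_compute_bitreverse.nat Vorbis.L.compute_bitreverse.size)
    (_h_ilog : ∀ (others : List Obj) (frames : List (Nat × FrameLayout)), Calls Lay μ Vorbis.WayInv (Vorbis.conv u₀) Vorbis.L.ilog.entry (Vorbis.Spec.ilog.spec others frames))
    (_h_bit_reverse : ∀ (others : List Obj) (frames : List (Nat × FrameLayout)), Calls Lay μ Vorbis.WayInv (Vorbis.conv u₀) Vorbis.L.bit_reverse.entry (Vorbis.Spec.bit_reverse.spec others frames))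
    (_h_asan_store2_noabort : Asan.SmallCheck Lay μ Vorbis.WayInv (Vorbis.CodeOK u₀) [.rax, .rcx, .rdx] 2 Vorbis.L.__asan_store2_noabort.entry),
    ∀ (others : List Obj) (frames : List (Nat × FrameLayout)) (k : Nat), Calls Lay μ Vorbis.WayInv (Vorbis.conv u₀) Vorbis.L.compute_bitreverse.entry (Vorbis.Spec.compute_bitreverse.spec others frames k)

end Vorbis.Spec.compute_bitreverse
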